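-- pv_equiv track=rewrite | github.com/TisoneK/localmind | core/agent.py | _truncate_web_search_results
-- ===== SOURCE A (Python) =====
-- WEB_SEARCH_MAX_CHARS_PER_RESULT = 100  # Extreme reduction
--
-- WEB_SEARCH_MAX_RESULTS = 1  # Only 1 result to minimize context
--
-- def _truncate_web_search_results(search_content: str) -> str:
--     """
--     Truncate web search results to prevent context bloat and LLM hanging.
--
--     Takes formatted search results like:
--     1. **Title**
--        URL
--        Description...
--
--     And truncates each result to WEB_SEARCH_MAX_CHARS_PER_RESULT chars,
--     keeping only WEB_SEARCH_MAX_RESULTS results.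
--     """
--     lines = search_content.split('\n')
--     truncated_results = []
--     current_result = []
--     result_count = 0
--
--     for line in lines:
--         # Detect new result (starts with number and **)
--         if line.strip().startswith(tuple(f"{i}." for i in range(1, 10))):
--             # Save previous result if exists
--             if current_result and result_count < WEB_SEARCH_MAX_RESULTS:
--                 result_text = '\n'.join(current_result)
--                 if len(result_text) > WEB_SEARCH_MAX_CHARS_PER_RESULT:
--                     result_text = result_text[:WEB_SEARCH_MAX_CHARS_PER_RESULT] + "..."
--                 truncated_results.append(result_text)
--                 result_count += 1
--
--             # Start new result
--             current_result = [line]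
--         else:
--             # Add to current result
--             current_result.append(line)
--
--     # Don't forget the last result
--     if current_result and result_count < WEB_SEARCH_MAX_RESULTS:
--         result_text = '\n'.join(current_result)
--         if len(result_text) > WEB_SEARCH_MAX_CHARS_PER_RESULT:
--             result_text = result_text[:WEB_SEARCH_MAX_CHARS_PER_RESULT] + "..."
--         truncated_results.append(result_text)
--
--     return '\n'.join(truncated_results)
-- ===== SOURCE B (Python) =====
-- WEB_SEARCH_MAX_CHARS_PER_RESULT = 100  # Extreme reduction
--
-- WEB_SEARCH_MAX_RESULTS = 1  # Only 1 result to minimize context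
--
--
-- def _is_result_marker(line):
--     return line.strip().startswith(tuple(f"{i}." for i in range(1, 10)))
--
--
-- def _truncate_to_limit(text):
--     if len(text) > WEB_SEARCH_MAX_CHARS_PER_RESULT:
--         return text[:WEB_SEARCH_MAX_CHARS_PER_RESULT] + "..."
--     return text
--
--
-- def _truncate_web_search_results(search_content: str) -> str:
--     lines = search_content.split('\n')
--     marks = [i for i, line in enumerate(lines) if _is_result_marker(line)]
--     starts = marks if marks[:1] == [0] else [0] + marks
--     ends = starts[1:] + [len(lines)]
--     pieces = [_truncate_to_limit('\n'.join(lines[s:e]))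
--               for s, e in list(zip(starts, ends))[:WEB_SEARCH_MAX_RESULTS]]
--     return '\n'.join(pieces)
-- ===== Notes on version B (the rewrite author's own statement) =====
-- stated objective: alternative
-- what changed: Replaces A's single accumulator loop (current_result list, result_count counter, repeated flush blocks) by index arithmetic: enumerate the lines, collect the marker-line indices, derive block boundaries by zipping starts with ends, and slice/truncate the first WEB_SEARCH_MAX_RESULTS blocks.
import Mathlib
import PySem

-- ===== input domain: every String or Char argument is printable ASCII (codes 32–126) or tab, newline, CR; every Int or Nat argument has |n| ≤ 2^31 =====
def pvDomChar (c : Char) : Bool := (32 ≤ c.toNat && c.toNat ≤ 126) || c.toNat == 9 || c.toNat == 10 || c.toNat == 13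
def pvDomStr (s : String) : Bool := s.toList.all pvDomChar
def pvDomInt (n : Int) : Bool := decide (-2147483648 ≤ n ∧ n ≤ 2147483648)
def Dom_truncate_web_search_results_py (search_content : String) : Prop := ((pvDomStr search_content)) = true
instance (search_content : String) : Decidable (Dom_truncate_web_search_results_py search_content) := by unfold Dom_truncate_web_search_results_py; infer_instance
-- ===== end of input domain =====

-- B re-implements A by marker-index slicing (enumerate/zip) instead of A's accumulator loop with a
-- result counter; same return value, objective: alternative decomposition (no speed claim).

-- ===== PORT A =====
-- shared helper: tuple(f"{i}." for i in range(1, 10))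
def pvMarkerPrefixes : List String := ["1.", "2.", "3.", "4.", "5.", "6.", "7.", "8.", "9."]

-- shared helper: line.strip().startswith(tuple(...)) — startswith on a tuple is "any prefix matches"
def pvIsMarker (line : String) : Bool :=
  pvMarkerPrefixes.any (fun p => PySem.Str.startswith (PySem.Str.strip line) p)

-- A's repeated flush block: result_text = '\n'.join(current_result); truncate to 100 chars + "..."
def pvFlushA (cur : List String) : String :=
  let t := PySem.Str.join "\n" cur
  if 100 < PySem.Str.len t then PySem.Str.join "" [PySem.Str.slice t none (some 100), "..."] else t

-- one iteration of A's for-loop; state = (truncated_results, current_result, result_count)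
def pvStepA (st : List String × List String × Int) (line : String) : List String × List String × Int :=
  if pvIsMarker line then
    if st.2.1 ≠ [] ∧ st.2.2 < 1 then (st.1 ++ [pvFlushA st.2.1], [line], st.2.2 + 1)
    else (st.1, [line], st.2.2)
  else (st.1, st.2.1 ++ [line], st.2.2)

def truncate_web_search_results_py (search_content : String) : String :=
  let lines := (PySem.Chars.splitOn search_content.toList ['\n']).map String.ofList
  let st := lines.foldl pvStepA ([], [], 0)
  let res := if st.2.1 ≠ [] ∧ st.2.2 < 1 then st.1 ++ [pvFlushA st.2.1] else st.1
  PySem.Str.join "\n" res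

-- ===== PORT B =====
-- _truncate_to_limit(text)
def pvTruncText (t : String) : String :=
  if 100 < PySem.Str.len t then PySem.Str.join "" [PySem.Str.slice t none (some 100), "..."] else t

def truncate_web_search_results_py_alt (search_content : String) : String :=
  let lines := (PySem.Chars.splitOn search_content.toList ['\n']).map String.ofList
  let marks := ((PySem.List.enumerate lines).filter (fun p => pvIsMarker p.2)).map (fun p => p.1)
  let starts := if marks.take 1 = [(0 : Int)] then marks else (0 : Int) :: marks
  let ends := starts.tail ++ [(lines.length : Int)]
  let pieces := ((starts.zip ends).take 1).map
      (fun se => pvTruncText (PySem.Str.join "\n" (PySem.List.slice lines (some se.1) (some se.2))))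
  PySem.Str.join "\n" pieces

-- ===== PRECONDITION & SPEC =====
def Spec_truncate_web_search_results_py (search_content : String) (out : String) : Prop := out = truncate_web_search_results_py_alt search_content
instance (search_content : String) (out : String) : Decidable (Spec_truncate_web_search_results_py search_content out) := by unfold Spec_truncate_web_search_results_py; infer_instance

-- ===== CLAIM (what is proved, stated in full; the proofs are below) =====
def Claim_equal_truncate_web_search_results_py : Prop := ∀ (search_content : String), Dom_truncate_web_search_results_py search_content → Spec_truncate_web_search_results_py search_content (truncate_web_search_results_py search_content)

-- ===== LEMMAS AND PROOFS =====

-- A's post-loop flush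
def pvFinishA (st : List String × List String × Int) : List String :=
  if st.2.1 ≠ [] ∧ st.2.2 < 1 then st.1 ++ [pvFlushA st.2.1] else st.1

-- A's whole body, as a function of the split lines
def pvAL (lines : List String) : String :=
  PySem.Str.join "\n" (pvFinishA (lines.foldl pvStepA ([], [], 0)))

-- B's whole body, as a function of the split lines
def pvBL (lines : List String) : String :=
  let marks := ((PySem.List.enumerate lines).filter (fun p => pvIsMarker p.2)).map (fun p => p.1)
  let starts := if marks.take 1 = [(0 : Int)] then marks else (0 : Int) :: marks
  let ends := starts.tail ++ [(lines.length : Int)]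
  let pieces := ((starts.zip ends).take 1).map
      (fun se => pvTruncText (PySem.Str.join "\n" (PySem.List.slice lines (some se.1) (some se.2))))
  PySem.Str.join "\n" pieces

-- the common value: truncate the first block (the lines up to the first marker line after line 0)
def pvCommon (lines : List String) : String :=
  match lines with
  | [] => ""
  | l :: rest => pvTruncText (PySem.Str.join "\n" (l :: rest.takeWhile (fun x => !pvIsMarker x)))

theorem pvA_def (s : String) :
    truncate_web_search_results_py s = pvAL ((PySem.Chars.splitOn s.toList ['\n']).map String.ofList) := rfl

theorem pvB_def (s : String) :
    truncate_web_search_results_py_alt s = pvBL ((PySem.Chars.splitOn s.toList ['\n']).map String.ofList) := rfl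

theorem pvJoin_singleton (sep x : String) : PySem.Str.join sep [x] = x := by
  simp [PySem.Str.join, PySem.Chars.join_singleton]

theorem pvFlushA_eq (cur : List String) : pvFlushA cur = pvTruncText (PySem.Str.join "\n" cur) := rfl

theorem pvTake_len_takeWhile {a : Type} (p : a → Bool) : ∀ (rest : List a),
    rest.take (rest.takeWhile p).length = rest.takeWhile p := by
  intro rest
  induction rest with
  | nil => simp
  | cons r rs ih => by_cases h : p r <;> simp [h, ih]

theorem pvFinishA_foldl_one (ls res cur : List String) :
    pvFinishA (ls.foldl pvStepA (res, cur, (1 : Int))) = res := by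
  induction ls generalizing cur with
  | nil => simp [pvFinishA]
  | cons l ls ih =>
    simp only [List.foldl_cons, pvStepA]
    split_ifs with h1 h2
    · exact absurd h2.2 (by norm_num)
    · exact ih _
    · exact ih _

theorem pvFinishA_foldl_zero (ls : List String) : ∀ (res cur : List String), cur ≠ [] →
    pvFinishA (ls.foldl pvStepA (res, cur, (0 : Int))) =
      res ++ [pvFlushA (cur ++ ls.takeWhile (fun l => !pvIsMarker l))] := by
  induction ls with
  | nil => intro res cur h; simp [pvFinishA, h]
  | cons l ls ih =>
    intro res cur h
    simp only [List.foldl_cons, pvStepA]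
    by_cases hm : pvIsMarker l
    · have hc : cur ≠ [] ∧ (0 : Int) < 1 := ⟨h, by norm_num⟩
      simp only [hm, if_pos hc, if_true]
      rw [(by norm_num : (0:Int) + 1 = 1), pvFinishA_foldl_one]
      simp [hm]
    · simp only [hm, if_false, Bool.false_eq_true]
      rw [ih res (cur ++ [l]) (by simp)]
      simp [hm]

theorem pvFirstMark (ls : List String) : ∀ (s : Int),
    (((PySem.List.enumerate ls s).filter (fun p => pvIsMarker p.2)).map (fun p => p.1)).head? =
      if (ls.takeWhile (fun l => !pvIsMarker l)).length = ls.length then none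
      else some (s + (ls.takeWhile (fun l => !pvIsMarker l)).length) := by
  induction ls with
  | nil => intro s; simp [PySem.List.enumerate_nil]
  | cons l ls ih =>
    intro s
    rw [PySem.List.enumerate_cons]
    by_cases hm : pvIsMarker l
    · simp [hm]
    · have h2 := ih (s + 1)
      by_cases hk : (List.takeWhile (fun x => !pvIsMarker x) ls).length = ls.length
      · simp [hm, h2, hk]
      · simp only [List.filter_cons, List.takeWhile_cons, hm, Bool.not_false, Bool.false_eq_true,
          if_false, if_true]
        rw [h2, if_neg hk, if_neg (by simp only [List.length_cons]; omega)]
        simp only [List.length_cons]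
        congr 1
        push_cast
        ring

theorem pvAL_eq (lines : List String) : pvAL lines = pvCommon lines := by
  cases lines with
  | nil => rfl
  | cons l rest =>
    unfold pvAL
    have hstep : pvStepA ([], [], 0) l = ([], [l], 0) := by
      simp [pvStepA]
    rw [List.foldl_cons, hstep, pvFinishA_foldl_zero rest [] [l] (by simp), List.nil_append,
      pvJoin_singleton, pvFlushA_eq]
    rfl

theorem pvSliceTake (l : String) (rest : List String) (k : Nat) :
    PySem.List.slice (l :: rest) (some (0:Int)) (some ((1:Int) + (k:Int)))
      = l :: rest.take k := by
  have h0 : (0:Int) = ((0:Nat):Int) := by simp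
  have h1 : ((1:Int) + (k:Int)) = (((1+k:Nat)):Int) := by push_cast; ring
  rw [h0, h1, PySem.List.slice_natCast]
  rw [show 1 + k - 0 = k + 1 by omega]
  rw [List.drop_zero, List.take_succ_cons]

theorem pvBL_eq (lines : List String) : pvBL lines = pvCommon lines := by
  cases lines with
  | nil => rfl
  | cons l rest =>
    simp only [pvBL, pvCommon]
    have hM := pvFirstMark rest 1
    have hk_le : (List.takeWhile (fun x => !pvIsMarker x) rest).length ≤ rest.length :=
      (List.takeWhile_sublist _).length_le
    have hmarks : (((PySem.List.enumerate (l :: rest)).filter (fun p => pvIsMarker p.2)).map (fun p => p.1))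
        = if pvIsMarker l then
            (0:Int) :: ((PySem.List.enumerate rest 1).filter (fun p => pvIsMarker p.2)).map (fun p => p.1)
          else ((PySem.List.enumerate rest 1).filter (fun p => pvIsMarker p.2)).map (fun p => p.1) := by
      rw [show PySem.List.enumerate (l :: rest) = PySem.List.enumerate (l :: rest) 0 from rfl,
        PySem.List.enumerate_cons]
      by_cases hm : pvIsMarker l <;> simp [hm]
    rw [hmarks]
    set M := ((PySem.List.enumerate rest 1).filter (fun p => pvIsMarker p.2)).map (fun p => p.1) with hMdef
    set k := (List.takeWhile (fun x => !pvIsMarker x) rest).length with hkdef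
    have hstarts : (if (if pvIsMarker l = true then (0:Int) :: M else M).take 1 = [(0:Int)]
        then (if pvIsMarker l = true then (0:Int) :: M else M)
        else (0:Int) :: (if pvIsMarker l = true then (0:Int) :: M else M)) = (0:Int) :: M := by
      by_cases hm : pvIsMarker l
      · simp [hm]
      · simp only [hm, Bool.false_eq_true, if_false]
        cases hMl : M with
        | nil => simp
        | cons a t =>
          have ha : a = 1 + (k:Int) := by
            rw [hMl] at hM
            by_cases hfull : k = rest.length
            · rw [if_pos hfull] at hM; simp at hM
            · rw [if_neg hfull] at hM
              simpa using hM
          have hane : a ≠ 0 := by rw [ha]; omega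
          simp [hane]
    rw [hstarts]
    by_cases hfull : k = rest.length
    · have hMnil : M = [] := by
        have := hM
        rw [if_pos hfull] at this
        exact List.head?_eq_none_iff.mp this
      rw [hMnil]
      have hlen : ((l :: rest).length : Int) = 1 + (k : Int) := by
        simp [List.length_cons, hfull]
        omega
      simp only [List.tail_cons, List.nil_append, List.zip_cons_cons, List.zip_nil_right, hlen]
      simp only [List.take_succ_cons, List.take_zero, List.map_cons, List.map_nil]
      rw [pvSliceTake, pvJoin_singleton, hkdef, pvTake_len_takeWhile]
    · have hMhead : M.head? = some (1 + (k:Int)) := by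
        rw [hM, if_neg hfull]
      cases hMl : M with
      | nil => rw [hMl] at hMhead; simp at hMhead
      | cons a t =>
        rw [hMl] at hMhead
        have ha : a = 1 + (k:Int) := by simpa using hMhead
        simp only [List.tail_cons, List.cons_append, List.zip_cons_cons, ha]
        simp only [List.take_succ_cons, List.take_zero, List.map_cons, List.map_nil]
        rw [pvSliceTake, pvJoin_singleton, hkdef, pvTake_len_takeWhile]

-- ===== VERDICT (by name: the statement is the Claim_ definition above) =====
theorem truncate_web_search_results_py_spec : Claim_equal_truncate_web_search_results_py := by
  intro s _
  unfold Spec_truncate_web_search_results_py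
  rw [pvA_def, pvB_def, pvAL_eq, pvBL_eq]
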